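-- pv_equiv track=rewrite | github.com/kiansheik/nhe-enga | pydicate/pydicate/predicate.py | _format_semfit_label
-- ===== SOURCE A (Python) =====
-- def _format_semfit_label(gloss_main, modifiers=None, width_break=3):
--     r"""
--     Return a single LaTeX label wrapped in \semfit{...}, with optional '\\'
--     inserted every `width_break` items to encourage vertical wrapping.
--     All strings are assumed already escaped for forest via escape_latex_forest_node.
--     """
--     modifiers = modifiers or []
--
--     def block(items):
--         if not items:
--             return ""
--         parts = []
--         for i, s in enumerate(items, 1):
--             parts.append(s)
--             if i < len(items):
--                 parts.append(", ")
--             if width_break and (i % width_break == 0) and (i < len(items)):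
--                 parts.append(r"\\ ")
--         return "".join(parts)
--
--     body = block(gloss_main)
--     if modifiers:
--         body += r"\\ \textcolor{black!60}{\footnotesize modifiers:} " + block(modifiers)
--     return rf"\semfit{{{body}}}"
-- ===== SOURCE B (Python) =====
-- def _format_semfit_label(gloss_main, modifiers=None, width_break=3):
--     r"""Chunk-and-join reimplementation: split items into runs of `width_break`,
--     join runs with ', ' inside and ', \\ ' between; non-positive width_break
--     means no line breaks."""
--     mods = modifiers or []
--
--     def block(items):
--         if width_break and width_break > 0:
--             chunks = [items[i:i + width_break] for i in range(0, len(items), width_break)]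
--             return r", \\ ".join(", ".join(c) for c in chunks)
--         return ", ".join(items)
--
--     body = block(gloss_main)
--     if mods:
--         body += r"\\ \textcolor{black!60}{\footnotesize modifiers:} " + block(mods)
--     return rf"\semfit{{{body}}}"
-- ===== Notes on version B (the rewrite author's own statement) =====
-- stated objective: simpler
-- what changed: Replaces the enumerate-loop that pushes per-item separator fragments into a parts list with slicing the items into width_break-sized chunks, joining each chunk with ', ' and chunks with ', \\ ' (bulk str.join instead of per-item appends and modulo tests).
-- intended difference: For negative width_break when a list is longer than |width_break|, A still inserts '\\ ' every |width_break| items (an artefact of Python's sign-following %), while B inserts no breaks because a non-positive width means no wrapping is intended. — e.g. on _format_semfit_label(["a", "b", "c", "d"], none, -3): A returns "\\semfit{a, b, c, \\\\ d}", B returns "\\semfit{a, b, c, d}"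
import Mathlib
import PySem

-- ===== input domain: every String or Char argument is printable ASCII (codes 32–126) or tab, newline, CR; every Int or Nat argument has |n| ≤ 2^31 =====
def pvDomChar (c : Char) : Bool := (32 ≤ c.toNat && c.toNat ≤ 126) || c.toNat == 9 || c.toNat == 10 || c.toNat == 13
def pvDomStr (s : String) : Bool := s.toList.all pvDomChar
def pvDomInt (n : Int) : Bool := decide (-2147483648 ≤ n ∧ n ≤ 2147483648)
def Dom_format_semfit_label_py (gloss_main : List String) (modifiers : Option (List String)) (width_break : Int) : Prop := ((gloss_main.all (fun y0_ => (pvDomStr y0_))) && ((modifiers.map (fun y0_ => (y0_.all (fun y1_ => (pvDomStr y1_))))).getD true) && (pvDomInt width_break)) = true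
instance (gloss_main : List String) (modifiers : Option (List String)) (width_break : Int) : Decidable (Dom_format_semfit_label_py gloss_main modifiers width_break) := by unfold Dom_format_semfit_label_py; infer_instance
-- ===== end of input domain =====

-- B replaces A's enumerate-loop that pushes separator fragments into a parts list by
-- chunk-slicing and two joins (simpler decomposition); for negative width_break B inserts
-- no breaks where A accidentally breaks every |width_break| items (stated as D_ below).


-- ===== PORT A =====
-- A's inner helper `block`: enumerate from 1, push item, then ", ", then "\\ " at break points.
def pvA_block (width_break : Int) (items : List String) : String :=
  if items = [] then ""
  else
    let parts := (PySem.List.enumerate items 1).foldl (fun parts p =>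
      let parts := parts ++ [p.2]
      let parts := if p.1 < (items.length : Int) then parts ++ [", "] else parts
      if width_break ≠ 0 ∧ PySem.Int.mod p.1 width_break = 0 ∧ p.1 < (items.length : Int) then
        parts ++ ["\\\\ "]
      else parts) []
    PySem.Str.join "" parts

def format_semfit_label_py (gloss_main : List String) (modifiers : Option (List String)) (width_break : Int) : String :=
  let mods : List String := match modifiers with | none => [] | some m => m  -- modifiers = modifiers or []
  let body := pvA_block width_break gloss_main
  let body := if mods ≠ [] then
      body ++ "\\\\ \\textcolor{black!60}{\\footnotesize modifiers:} " ++ pvA_block width_break mods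
    else body
  "\\semfit{" ++ body ++ "}"

-- ===== PORT B =====
-- B's inner helper `block`: slice into width_break-sized chunks, join with ", " inside and ", \\ " between.
def pvB_block (width_break : Int) (items : List String) : String :=
  if width_break ≠ 0 ∧ width_break > 0 then
    let chunks := (PySem.List.pyRange 0 (items.length : Int) width_break).map
      (fun i => PySem.List.slice items (some i) (some (i + width_break)))
    PySem.Str.join ", \\\\ " (chunks.map (fun c => PySem.Str.join ", " c))
  else
    PySem.Str.join ", " items

def format_semfit_label_py_alt (gloss_main : List String) (modifiers : Option (List String)) (width_break : Int) : String :=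
  let mods : List String := match modifiers with | none => [] | some m => m  -- mods = modifiers or []
  let body := pvB_block width_break gloss_main
  let body := if mods ≠ [] then
      body ++ "\\\\ \\textcolor{black!60}{\\footnotesize modifiers:} " ++ pvB_block width_break mods
    else body
  "\\semfit{" ++ body ++ "}"

-- ===== PRECONDITION & SPEC =====
-- For negative width_break when a list is longer than |width_break|, A still inserts '\\ '
-- every |width_break| items (an artefact of Python's sign-following %), while B inserts no
-- breaks because a non-positive width means no wrapping is intended.
def D_format_semfit_label_py (gloss_main : List String) (modifiers : Option (List String)) (width_break : Int) : Prop :=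
  width_break < 0 ∧ ((gloss_main.length : Int) > -width_break ∨ (((modifiers.getD []).length : Int) > -width_break))
instance (gloss_main : List String) (modifiers : Option (List String)) (width_break : Int) : Decidable (D_format_semfit_label_py gloss_main modifiers width_break) := by unfold D_format_semfit_label_py; infer_instance

def Spec_format_semfit_label_py (gloss_main : List String) (modifiers : Option (List String)) (width_break : Int) (out : String) : Prop := ¬ D_format_semfit_label_py gloss_main modifiers width_break → out = format_semfit_label_py_alt gloss_main modifiers width_break
instance (gloss_main : List String) (modifiers : Option (List String)) (width_break : Int) (out : String) : Decidable (Spec_format_semfit_label_py gloss_main modifiers width_break out) := by unfold Spec_format_semfit_label_py; infer_instance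

def pvDiffWitness_format_semfit_label_py : List String × Option (List String) × Int := (["a", "b", "c", "d"], none, -3)
def pvDiffWitnessOut_format_semfit_label_py : String × String := ("\\semfit{a, b, c, \\\\ d}", "\\semfit{a, b, c, d}")

-- ===== CLAIM (what is proved, stated in full; the proofs are below) =====
def Claim_unchanged_format_semfit_label_py : Prop := ∀ (gloss_main : List String) (modifiers : Option (List String)) (width_break : Int), Dom_format_semfit_label_py gloss_main modifiers width_break → Spec_format_semfit_label_py gloss_main modifiers width_break (format_semfit_label_py gloss_main modifiers width_break)
def Claim_changed_format_semfit_label_py : Prop := Dom_format_semfit_label_py (pvDiffWitness_format_semfit_label_py.1) (pvDiffWitness_format_semfit_label_py.2.1) (pvDiffWitness_format_semfit_label_py.2.2) ∧ D_format_semfit_label_py (pvDiffWitness_format_semfit_label_py.1) (pvDiffWitness_format_semfit_label_py.2.1) (pvDiffWitness_format_semfit_label_py.2.2) ∧ format_semfit_label_py (pvDiffWitness_format_semfit_label_py.1) (pvDiffWitness_format_semfit_label_py.2.1) (pvDiffWitness_format_semfit_label_py.2.2) = pvDiffWitnessOut_format_semfit_label_py.1 ∧ format_semfit_label_py_alt (pvDiffWitness_format_semfit_label_py.1)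 (pvDiffWitness_format_semfit_label_py.2.1) (pvDiffWitness_format_semfit_label_py.2.2) = pvDiffWitnessOut_format_semfit_label_py.2 ∧ pvDiffWitnessOut_format_semfit_label_py.1 ≠ pvDiffWitnessOut_format_semfit_label_py.2

-- ===== LEMMAS AND PROOFS =====

def pvCanon (w n : Int) : Int → List String → String
  | _, [] => ""
  | j, s :: rest =>
      s ++ (if j < n then ", " else "") ++
        (if w ≠ 0 ∧ PySem.Int.mod j w = 0 ∧ j < n then "\\\\ " else "") ++
        pvCanon w n (j + 1) rest
theorem pvJoin_cons_cons (sep x y : String) (l : List String) :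
    PySem.Str.join sep (x :: y :: l) = x ++ sep ++ PySem.Str.join sep (y :: l) := by
  simp [PySem.Str.join, PySem.Chars.join_cons_cons, String.ofList_append, String.append_assoc]
theorem pvJoin_singleton (sep x : String) : PySem.Str.join sep [x] = x := by
  simp [PySem.Str.join, PySem.Chars.join_singleton]

theorem pvCanon_join (w n : Int) (h : ∀ j : Int, 1 ≤ j → j < n → ¬(w ≠ 0 ∧ PySem.Int.mod j w = 0)) :
    ∀ (items : List String) (j : Int), 1 ≤ j → j + items.length = n + 1 →
    pvCanon w n j items = PySem.Str.join ", " items := by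
  intro items
  induction items with
  | nil => intro j _ _; simp [pvCanon, PySem.Str.join, PySem.Chars.join_nil]
  | cons s rest ih =>
    intro j hj hlen
    simp only [pvCanon]
    cases rest with
    | nil =>
      have : ¬ j < n := by simp at hlen; omega
      simp [this, pvCanon, pvJoin_singleton, String.append_empty]
    | cons y l =>
      have hjn : j < n := by simp at hlen ⊢; omega
      have hnb := h j hj hjn
      rw [if_pos hjn, if_neg (by tauto)]
      rw [ih (j+1) (by omega) (by simp at hlen ⊢; omega)]
      rw [pvJoin_cons_cons]
      simp [String.append_assoc]

theorem pvCanon_chunkAux (w n : Int) :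
    ∀ (c : List String), c ≠ [] → ∀ (j : Int) (rest : List String),
    1 ≤ j → j - 1 + c.length + rest.length = n →
    (∀ i : Int, j ≤ i → i < j - 1 + c.length → ¬ w ∣ i) →
    (rest ≠ [] → w ∣ (j - 1 + c.length)) →
    pvCanon w n j (c ++ rest) = PySem.Str.join ", " c ++
      (if rest = [] then "" else ", " ++ "\\\\ " ++ pvCanon w n (j - 1 + c.length + 1) rest) := by
  intro c
  induction c with
  | nil => intro h; exact absurd rfl h
  | cons s c' ih =>
    intro _ j rest hj hn hin hend
    simp only [List.cons_append, pvCanon]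
    cases hc' : c' with
    | nil =>
      subst hc'
      cases rest with
      | nil =>
        have : ¬ j < n := by simp at hn; omega
        simp [this, pvCanon, pvJoin_singleton, String.append_empty]
      | cons y l =>
        have hjn : j < n := by simp at hn ⊢; omega
        have hd : w ∣ j := by have := hend (by simp); simpa using this
        have hw0 : w ≠ 0 := by rintro rfl; simp at hd; omega
        rw [if_pos hjn, if_pos ⟨hw0, (PySem.Int.mod_eq_zero_iff_dvd _ _).mpr hd, hjn⟩]
        simp only [List.nil_append, pvJoin_singleton]
        rw [if_neg (by simp)]
        simp only [List.length_cons, List.length_nil]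
        rw [show j - 1 + ((0:Nat) + 1 : Nat) + 1 = j + 1 by push_cast; ring]
        simp [String.append_assoc]
    | cons y l =>
      have hc'ne : c' ≠ [] := by rw [hc']; simp
      rw [← hc']
      have hlen2 : (2:Int) ≤ ((s :: c').length : Int) := by rw [hc']; simp only [List.length_cons]; push_cast; omega
      have hn' : j - 1 + (((c').length : Int) + 1) + rest.length = n := by
        simpa [List.length_cons] using hn
      have hjn : j < n := by omega
      have hnb : ¬ w ∣ j := hin j (by omega) (by simp only [List.length_cons]; push_cast; omega)
      rw [if_pos hjn, if_neg (by rintro ⟨_, hmod, _⟩; exact hnb ((PySem.Int.mod_eq_zero_iff_dvd _ _).mp hmod))]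
      rw [ih hc'ne (j+1) rest (by omega) (by omega)
        (by intro i h1 h2; exact hin i (by omega) (by simp only [List.length_cons]; push_cast; omega))
        (by intro hr; have h5 := hend hr; simp only [List.length_cons] at h5
            have : j + 1 - 1 + ((c').length : Int) = j - 1 + (((c').length : Int) + 1) := by omega
            rw [this]; exact_mod_cast h5)]
      rw [hc', pvJoin_cons_cons]
      rw [show j + 1 - 1 + ((y :: l).length : Int) + 1 = j - 1 + (((y :: l).length : Int) + 1) + 1 by omega]
      simp only [List.length_cons]
      push_cast
      simp [String.append_assoc, String.append_empty]

theorem pvJoin_nil (sep : String) : PySem.Str.join sep [] = "" := by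
  simp [PySem.Str.join, PySem.Chars.join_nil]

theorem pvJoin_cons_ne (sep x : String) (l : List String) (h : l ≠ []) :
    PySem.Str.join sep (x :: l) = x ++ sep ++ PySem.Str.join sep l := by
  cases l with
  | nil => exact absurd rfl h
  | cons y ys => exact pvJoin_cons_cons sep x y ys

theorem pvPyRange_pos_nil (a b w : Int) (hw : 0 < w) (h : b ≤ a) : PySem.List.pyRange a b w = [] := by
  rw [PySem.List.pyRange_of_pos a b hw]
  simp [show ¬ a < b by omega]

theorem pvPyRange_pos_cons (a b w : Int) (hw : 0 < w) (h : a < b) :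
    PySem.List.pyRange a b w = a :: PySem.List.pyRange (a + w) b w := by
  rw [PySem.List.pyRange_of_pos a b hw, PySem.List.pyRange_of_pos (a + w) b hw]
  by_cases h2 : a + w < b
  · simp only [if_pos h, if_pos h2]
    have key : (b - a + w - 1) / w = (b - (a + w) + w - 1) / w + 1 := by
      have h3 : b - a + w - 1 = (b - (a + w) + w - 1) + 1 * w := by ring
      rw [h3, Int.add_mul_ediv_right _ _ (by omega : w ≠ 0)]
    have hnn : 0 ≤ (b - (a + w) + w - 1) / w := Int.ediv_nonneg (by omega) (by omega)
    rw [key]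
    rw [show ((b - (a + w) + w - 1) / w + 1).toNat = ((b - (a + w) + w - 1) / w).toNat + 1 by omega]
    rw [List.range_succ_eq_map]
    simp only [List.map_cons, List.map_map]
    refine congrArg₂ _ (by ring) (List.map_congr_left ?_)
    intro k _
    simp [Function.comp, Nat.succ_eq_add_one]
    ring
  · simp only [if_pos h, if_neg h2]
    have key : (b - a + w - 1) / w = 1 := by
      rw [← PySem.Int.floordiv_eq_ediv_of_pos hw]
      rw [PySem.Int.floordiv_eq_iff_of_pos hw]
      constructor <;> [omega; nlinarith]
    rw [key]
    simp

theorem pvB_chunks (w : Int) (hw : 0 < w) (all : List String) : ∀ (k : Nat), k ≤ all.length →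
    w ∣ (k : Int) →
    PySem.Str.join ", \\\\ " ((PySem.List.pyRange (k : Int) (all.length : Int) w).map
        (fun i => PySem.Str.join ", " (PySem.List.slice all (some i) (some (i + w)))))
      = pvCanon w (all.length : Int) ((k : Int) + 1) (all.drop k) := by
  have main : ∀ (d k : Nat), all.length - k ≤ d → k ≤ all.length → w ∣ (k : Int) →
      PySem.Str.join ", \\\\ " ((PySem.List.pyRange (k : Int) (all.length : Int) w).map
          (fun i => PySem.Str.join ", " (PySem.List.slice all (some i) (some (i + w)))))
        = pvCanon w (all.length : Int) ((k : Int) + 1) (all.drop k) := by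
    intro d
    induction d with
    | zero =>
      intro k hd hk _
      have hke : k = all.length := by omega
      subst hke
      rw [pvPyRange_pos_nil _ _ _ hw (by omega)]
      simp [pvJoin_nil, List.drop_length, pvCanon]
    | succ d ihd =>
      intro k hd hk hdvd
      by_cases hklen : all.length ≤ k
      · have hke : k = all.length := by omega
        subst hke
        rw [pvPyRange_pos_nil _ _ _ hw (by omega)]
        simp [pvJoin_nil, List.drop_length, pvCanon]
      · have hklt : k < all.length := by omega
        rw [pvPyRange_pos_cons _ _ _ hw (by exact_mod_cast hklt)]
        rw [List.map_cons]
        -- the head chunk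
        have hslice : PySem.List.slice all (some (k : Int)) (some ((k : Int) + w)) =
            (all.drop k).take w.toNat := by
          rw [PySem.List.slice_toNat all (by positivity) (by omega)]
          congr 1 <;> omega
        have hwn : 1 ≤ w.toNat := by omega
        have hcne : (all.drop k).take w.toNat ≠ [] := by
          have : all.drop k ≠ [] := by
            intro h; have := congrArg List.length h; simp at this; omega
          cases hdk : all.drop k with
          | nil => exact absurd hdk this
          | cons a as =>
            cases hwt : w.toNat with
            | zero => omega
            | succ m => simp
        have hclen : ((all.drop k).take w.toNat).length = min w.toNat (all.length - k) := by
          simp [List.length_take, List.length_drop]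
        have hsplit : all.drop k = (all.drop k).take w.toNat ++ all.drop (k + w.toNat) := by
          conv_lhs => rw [← List.take_append_drop w.toNat (all.drop k)]
          rw [List.drop_drop]
        have hinner : ∀ i : Int, (k : Int) + 1 ≤ i → i < (k : Int) + 1 - 1 + (((all.drop k).take w.toNat).length : Int) → ¬ w ∣ i := by
          intro i h1 h2 hdi
          have h3 : w ∣ (i - k) := Int.dvd_sub hdi hdvd
          have h4 : (0 : Int) < i - k := by omega
          have h5 : w ≤ i - k := Int.le_of_dvd h4 h3
          have h6 : (((all.drop k).take w.toNat).length : Int) ≤ w := by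
            rw [hclen]; push_cast; omega
          omega
        by_cases htail : all.length ≤ k + w.toNat
        · -- last chunk
          rw [pvPyRange_pos_nil ((k : Int) + w) _ _ hw (by push_cast; omega), List.map_nil]
          rw [pvJoin_singleton, hslice]
          have hrest : all.drop (k + w.toNat) = [] := by
            apply List.drop_eq_nil_of_le; omega
          rw [show ((k : Int) + 1) = ((k:Int) + 1) by rfl]
          conv_rhs => rw [hsplit, hrest]
          rw [pvCanon_chunkAux w (all.length : Int) _ hcne ((k : Int) + 1) [] (by omega)
            (by rw [hclen]; push_cast; simp; omega) hinner (by intro h; exact absurd rfl h)]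
          simp [String.append_empty]
        · -- full chunk, more to come
          have htail' : k + w.toNat < all.length := by omega
          have hkwcast : (k : Int) + w = ((k + w.toNat : Nat) : Int) := by push_cast; omega
          have htailne : PySem.List.pyRange ((k : Int) + w) (all.length : Int) w ≠ [] := by
            rw [pvPyRange_pos_cons _ _ _ hw (by push_cast; omega)]
            simp
          have hmapne : (PySem.List.pyRange ((k : Int) + w) (all.length : Int) w).map
              (fun i => PySem.Str.join ", " (PySem.List.slice all (some i) (some (i + w)))) ≠ [] := by
            simpa using htailne
          rw [pvJoin_cons_ne _ _ _ hmapne, hslice]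
          rw [hkwcast]
          rw [ihd (k + w.toNat) (by omega) (by omega) (by push_cast [Int.toNat_of_nonneg (le_of_lt hw)]; exact dvd_add hdvd (dvd_refl w))]
          have hclenw : (((all.drop k).take w.toNat).length : Int) = w := by
            rw [hclen]; push_cast; omega
          conv_rhs => rw [hsplit]
          rw [pvCanon_chunkAux w (all.length : Int) _ hcne ((k : Int) + 1) (all.drop (k + w.toNat)) (by omega)
            (by rw [hclenw]; simp [List.length_drop]; push_cast; omega)
            hinner
            (by intro _; rw [hclenw]; rw [show (k : Int) + 1 - 1 + w = (k : Int) + w by ring]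
                exact dvd_add (by exact_mod_cast hdvd) (dvd_refl w))]
          rw [if_neg (by intro h; have := congrArg List.length h; simp at this; omega)]
          rw [show (k : Int) + 1 - 1 + (((all.drop k).take w.toNat).length : Int) + 1 = ((k + w.toNat : Nat) : Int) + 1 by rw [hclenw]; push_cast; omega]
          rw [show (", \\\\ " : String) = ", " ++ "\\\\ " by rfl]
          simp [String.append_assoc]
  intro k hk hdvd
  exact main (all.length - k) k (by omega) hk hdvd



theorem pvJoinE_nil : PySem.Str.join "" ([] : List String) = "" := by
  simp [PySem.Str.join, PySem.Chars.join_nil]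
theorem pvJoinE_cons (x : String) (l : List String) :
    PySem.Str.join "" (x :: l) = x ++ PySem.Str.join "" l := by
  cases l with
  | nil => simp [PySem.Str.join, PySem.Chars.join_singleton, PySem.Chars.join_nil]
  | cons y ys => simp [PySem.Str.join, PySem.Chars.join_cons_cons, String.ofList_append]
theorem pvJoinE_append (xs ys : List String) :
    PySem.Str.join "" (xs ++ ys) = PySem.Str.join "" xs ++ PySem.Str.join "" ys := by
  induction xs with
  | nil => simp [pvJoinE_nil]
  | cons x xs ih => simp [pvJoinE_cons, ih, String.append_assoc]

theorem pvA_loop (w n : Int) (items : List String) : ∀ (j : Int) (acc : List String),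
    PySem.Str.join "" ((PySem.List.enumerate items j).foldl (fun parts p =>
      let parts := parts ++ [p.2]
      let parts := if p.1 < n then parts ++ [", "] else parts
      if w ≠ 0 ∧ PySem.Int.mod p.1 w = 0 ∧ p.1 < n then parts ++ ["\\\\ "] else parts) acc)
      = PySem.Str.join "" acc ++ pvCanon w n j items := by
  induction items with
  | nil => intro j acc; simp [PySem.List.enumerate_nil, pvCanon, String.append_empty]
  | cons s rest ih =>
    intro j acc
    rw [PySem.List.enumerate_cons, List.foldl_cons, ih]
    simp only [pvCanon]
    split_ifs with h1 h2 h2 <;>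
      simp [pvJoinE_append, pvJoinE_cons, pvJoinE_nil, String.append_assoc, String.append_empty]

theorem pvA_block_eq (w : Int) (items : List String) :
    pvA_block w items = pvCanon w (items.length : Int) 1 items := by
  unfold pvA_block
  split_ifs with h
  · subst h; simp [pvCanon]
  · rw [pvA_loop w (items.length : Int) items 1 []]
    simp [pvJoinE_nil]

theorem pvB_block_eq_pos (w : Int) (hw : 0 < w) (items : List String) :
    pvB_block w items = pvCanon w (items.length : Int) 1 items := by
  unfold pvB_block
  rw [if_pos ⟨by omega, hw⟩]
  simp only [List.map_map]
  have := pvB_chunks w hw items 0 (by omega) (by simp)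
  simpa [Function.comp] using this

theorem pvBlock_eq (w : Int) (items : List String)
    (hneg : w < 0 → (items.length : Int) ≤ -w) :
    pvA_block w items = pvB_block w items := by
  rcases lt_trichotomy 0 w with hw | hw | hw
  · rw [pvA_block_eq, pvB_block_eq_pos w hw]
  · subst hw
    unfold pvB_block
    rw [if_neg (by simp)]
    rw [pvA_block_eq]
    exact pvCanon_join 0 _ (by intro j _ _ h; exact h.1 rfl) items 1 (by omega) (by push_cast; ring)
  · unfold pvB_block
    rw [if_neg (by omega)]
    rw [pvA_block_eq]
    refine pvCanon_join w _ ?_ items 1 (by omega) (by push_cast; ring)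
    intro j hj hjn ⟨hw0, hmod⟩
    have hdvd : w ∣ j := (PySem.Int.mod_eq_zero_iff_dvd _ _).mp hmod
    have hdvd' : (-w) ∣ j := (neg_dvd).mpr hdvd
    have hle : -w ≤ j := Int.le_of_dvd (by omega) hdvd'
    have := hneg hw
    omega

-- ===== VERDICT (by name: the statement is the Claim_ definition above) =====
theorem format_semfit_label_py_spec : Claim_unchanged_format_semfit_label_py := by
  intro g m w _ hnd
  unfold D_format_semfit_label_py at hnd
  have hg : w < 0 → (g.length : Int) ≤ -w := by
    intro hw; by_contra hc
    exact hnd ⟨hw, Or.inl (by omega)⟩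
  have hm : w < 0 → ((m.getD []).length : Int) ≤ -w := by
    intro hw; by_contra hc
    exact hnd ⟨hw, Or.inr (by omega)⟩
  cases m with
  | none =>
    simp only [format_semfit_label_py, format_semfit_label_py_alt]
    rw [pvBlock_eq w g hg, pvBlock_eq w [] (by intro h; simp; omega)]
  | some ms =>
    simp only [Option.getD_some] at hm
    simp only [format_semfit_label_py, format_semfit_label_py_alt]
    rw [pvBlock_eq w g hg, pvBlock_eq w ms hm]

theorem format_semfit_label_py_changed : Claim_changed_format_semfit_label_py := by
  unfold Claim_changed_format_semfit_label_py; decide
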